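-- pv_equiv track=rewrite | github.com/pkonarzewski/what-i-learned | books/algorytmy_i_struktury_danych_walaszczek/1.przedzialy_liczbowe.py | find_div2
-- ===== SOURCE A (Python) =====
-- from math import ceil
--
-- def find_div2(a, b, P):
--     """Liczby te będą wielokrotnościami swoich podzielników."""
--
--     P = set([abs(x) for x in P])
--     min_p = []
--     result = []
--
--     for p in P:
--         min_p = ceil(a / p) * p
--
--         for n in range(min_p, b+1, p):
--             result.append(n)
--
--     return sorted(list(set(result)))
-- ===== SOURCE B (Python) =====
-- def merge_dedup(xs, ys):
--     """Merge two strictly increasing lists into one, dropping duplicates."""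
--     i = j = 0
--     out = []
--     while i < len(xs) and j < len(ys):
--         x, y = xs[i], ys[j]
--         if x < y:
--             out.append(x); i += 1
--         elif y < x:
--             out.append(y); j += 1
--         else:
--             out.append(x); i += 1; j += 1
--     out.extend(xs[i:])
--     out.extend(ys[j:])
--     return out
--
-- def find_div2(a, b, P):
--     """Liczby te będą wielokrotnościami swoich podzielników."""
--     runs = []
--     for x in P:
--         p = abs(x)
--         start = a + (-a) % p          # least multiple of p that is >= a
--         runs.append(list(range(start, b + 1, p)))
--     if not runs:
--         return []
--     while len(runs) > 1:              # balanced tournament of merges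
--         merged = [merge_dedup(runs[i], runs[i + 1]) for i in range(0, len(runs) - 1, 2)]
--         if len(runs) % 2:
--             merged.append(runs[-1])
--         runs = merged
--     return runs[0]
-- ===== Notes on version B (the rewrite author's own statement) =====
-- stated objective: alternative
-- what changed: A concatenates every divisor's run of multiples, deduplicates through a set and sorts the union; B computes each divisor's strictly increasing run arithmetically (a + (-a) % p instead of float ceil) and combines the runs with a balanced tournament of duplicate-dropping two-pointer merges, so the result is built already sorted with no set and no sort.
import Mathlib
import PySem

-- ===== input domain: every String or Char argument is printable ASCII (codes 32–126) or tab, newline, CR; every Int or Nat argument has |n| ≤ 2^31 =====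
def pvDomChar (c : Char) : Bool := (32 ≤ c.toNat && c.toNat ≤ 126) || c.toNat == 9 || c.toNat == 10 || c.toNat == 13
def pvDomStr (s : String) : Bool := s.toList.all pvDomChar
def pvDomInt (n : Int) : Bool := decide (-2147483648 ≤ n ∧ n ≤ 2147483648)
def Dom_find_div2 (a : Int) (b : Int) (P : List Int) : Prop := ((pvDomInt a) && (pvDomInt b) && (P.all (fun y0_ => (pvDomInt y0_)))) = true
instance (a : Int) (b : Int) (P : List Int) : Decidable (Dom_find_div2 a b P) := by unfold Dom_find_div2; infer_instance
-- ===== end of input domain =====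

-- B replaces A's per-divisor multiple enumeration + set-dedupe + sort by a balanced tournament
-- of duplicate-dropping merges of the per-divisor sorted runs (no set, no sort; return value only).


-- ===== PORT A =====
-- ceil(a / p) in A is float division; on Dom (|a|,|p| ≤ 2^31 < 2^53) the float quotient is
-- close enough that its ceil equals the exact integer ceil, ported as -((-a) // p).
-- A's loop iterates over a Python set; its final sorted(set(result)) does not depend on
-- that iteration order, so iterating in first-insertion order is exact.
def find_div2 (a : Int) (b : Int) (P : List Int) : List Int :=
  let Pset : PySem.Set Int := PySem.Set.ofList (P.map (fun x => |x|))
  let result : List Int :=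
    Pset.foldl (fun result p =>
      let min_p := -(PySem.Int.floordiv (-a) p) * p
      result ++ PySem.List.pyRange min_p (b + 1) p) []
  PySem.List.sorted (PySem.Set.ofList result) (fun x => x) false

-- ===== PORT B =====
-- Source B's merge_dedup: the two-pointer while loop over xs[i:], ys[j:], written as the
-- obvious structural recursion on the two suffixes (same comparisons, same output order)
def mergeDedup : List Int → List Int → List Int
  | [], ys => ys
  | x :: xs, [] => x :: xs
  | x :: xs, y :: ys =>
    if x < y then x :: mergeDedup xs (y :: ys)
    else if y < x then y :: mergeDedup (x :: xs) ys
    else x :: mergeDedup xs ys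

-- Source B's tournament: one comprehension round merges adjacent pairs (odd leftover kept),
-- the while loop repeats rounds until one run remains
def mergeRound : List (List Int) → List (List Int)
  | r1 :: r2 :: rest => mergeDedup r1 r2 :: mergeRound rest
  | rs => rs

theorem length_mergeRound_le (rs : List (List Int)) : (mergeRound rs).length ≤ rs.length := by
  fun_induction mergeRound rs with
  | case1 r1 r2 rest ih => simp only [List.length_cons]; omega
  | case2 rs h => exact le_refl _

def mergeAll : List (List Int) → List Int
  | [] => []
  | [r] => r
  | r1 :: r2 :: rest => mergeAll (mergeDedup r1 r2 :: mergeRound rest)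
  termination_by rs => rs.length
  decreasing_by
    simp only [List.length_cons]
    have := length_mergeRound_le rest
    omega

def find_div2_alt (a : Int) (b : Int) (P : List Int) : List Int :=
  mergeAll (P.map (fun x =>
    let p := |x|
    let start := a + PySem.Int.mod (-a) p
    PySem.List.pyRange start (b + 1) p))

-- ===== PRECONDITION & SPEC =====
-- Pre_ excludes only inputs where A raises: with 0 in P, A divides a by 0 (ZeroDivisionError).
def Pre_find_div2 (a : Int) (b : Int) (P : List Int) : Prop := (0 : Int) ∉ P
instance (a : Int) (b : Int) (P : List Int) : Decidable (Pre_find_div2 a b P) := by unfold Pre_find_div2; infer_instance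
def pvWitness_find_div2 : Int × Int × List Int := (3, 20, [3, -5])

def Spec_find_div2 (a : Int) (b : Int) (P : List Int) (out : List Int) : Prop := out = find_div2_alt a b P
instance (a : Int) (b : Int) (P : List Int) (out : List Int) : Decidable (Spec_find_div2 a b P out) := by unfold Spec_find_div2; infer_instance

-- ===== CLAIM (what is proved, stated in full; the proofs are below) =====
def Claim_equal_find_div2 : Prop := ∀ (a : Int) (b : Int) (P : List Int), Dom_find_div2 a b P → Pre_find_div2 a b P → Spec_find_div2 a b P (find_div2 a b P)

-- ===== LEMMAS AND PROOFS =====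

-- both programs start each divisor's run at the same point: a + (-a) % p = ceil(a/p)*p
theorem start_eq (a p : Int) : a + PySem.Int.mod (-a) p = -(PySem.Int.floordiv (-a) p) * p := by
  have h := PySem.Int.floordiv_mul_add_mod (-a) p
  linarith

-- the raw multiples list A accumulates, named so the proofs can speak about it
def resultA (a b : Int) (P : List Int) : List Int :=
  (PySem.Set.ofList (P.map (fun x => |x|))).foldl (fun result p =>
    let min_p := -(PySem.Int.floordiv (-a) p) * p
    result ++ PySem.List.pyRange min_p (b + 1) p) []

theorem find_div2_def (a b : Int) (P : List Int) :
    find_div2 a b P = PySem.List.sorted (PySem.Set.ofList (resultA a b P)) (fun x => x) false := rfl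

theorem mem_mergeDedup (xs ys : List Int) (n : Int) :
    n ∈ mergeDedup xs ys ↔ n ∈ xs ∨ n ∈ ys := by
  fun_induction mergeDedup xs ys with
  | case1 ys => simp
  | case2 x xs => simp
  | case3 x xs y ys h ih => simp only [List.mem_cons, ih]; tauto
  | case4 x xs y ys h h' ih => simp only [List.mem_cons, ih]; tauto
  | case5 x xs y ys h h' ih =>
    have : x = y := le_antisymm (not_lt.1 h') (not_lt.1 h)
    subst this
    simp only [List.mem_cons, ih]; tauto

theorem pairwise_mergeDedup (xs ys : List Int)
    (hx : xs.Pairwise (· < ·)) (hy : ys.Pairwise (· < ·)) :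
    (mergeDedup xs ys).Pairwise (· < ·) := by
  fun_induction mergeDedup xs ys with
  | case1 ys => exact hy
  | case2 x xs => exact hx
  | case3 x xs y ys h ih =>
    rw [List.pairwise_cons] at hx
    refine List.pairwise_cons.2 ⟨?_, ih hx.2 hy⟩
    intro m hm
    rcases (mem_mergeDedup _ _ m).1 hm with hmx | hmy
    · exact hx.1 m hmx
    · rcases List.mem_cons.1 hmy with rfl | hmy'
      · exact h
      · exact lt_trans h ((List.pairwise_cons.1 hy).1 m hmy')
  | case4 x xs y ys h h' ih =>
    rw [List.pairwise_cons] at hy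
    refine List.pairwise_cons.2 ⟨?_, ih hx hy.2⟩
    intro m hm
    rcases (mem_mergeDedup _ _ m).1 hm with hmx | hmy
    · rcases List.mem_cons.1 hmx with rfl | hmx'
      · exact h'
      · exact lt_trans h' ((List.pairwise_cons.1 hx).1 m hmx')
    · exact hy.1 m hmy
  | case5 x xs y ys h h' ih =>
    have hxy : x = y := le_antisymm (not_lt.1 h') (not_lt.1 h)
    rw [List.pairwise_cons] at hx hy
    refine List.pairwise_cons.2 ⟨?_, ih hx.2 hy.2⟩
    intro m hm
    rcases (mem_mergeDedup _ _ m).1 hm with hmx | hmy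
    · exact hx.1 m hmx
    · exact hxy ▸ hy.1 m hmy

-- the run of multiples of p starting at ceil(a/p)*p, shared by both sides
def runOf (a b p : Int) : List Int :=
  PySem.List.pyRange (-(PySem.Int.floordiv (-a) p) * p) (b + 1) p

theorem pairwise_runOf (a b p : Int) (hp : 0 < p) : (runOf a b p).Pairwise (· < ·) := by
  unfold runOf
  rw [PySem.List.pyRange_of_pos _ _ hp]
  refine List.Pairwise.map _ ?_ List.pairwise_lt_range
  intro k k' hk
  have : (k : Int) < (k' : Int) := by exact_mod_cast hk
  nlinarith

-- a tournament of duplicate-dropping merges of strictly increasing runs is strictly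
-- increasing and holds exactly the union of the runs
theorem mem_mergeRound (rs : List (List Int)) (n : Int) :
    (∃ r ∈ mergeRound rs, n ∈ r) ↔ (∃ r ∈ rs, n ∈ r) := by
  fun_induction mergeRound rs with
  | case1 r1 r2 rest ih =>
    simp only [List.mem_cons]
    constructor
    · rintro ⟨r, (rfl | hr), hn⟩
      · rcases (mem_mergeDedup r1 r2 n).1 hn with h | h
        · exact ⟨r1, Or.inl rfl, h⟩
        · exact ⟨r2, Or.inr (Or.inl rfl), h⟩
      · obtain ⟨r', hr', hn'⟩ := ih.1 ⟨r, hr, hn⟩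
        exact ⟨r', Or.inr (Or.inr hr'), hn'⟩
    · rintro ⟨r, (rfl | rfl | hr), hn⟩
      · exact ⟨mergeDedup r r2, Or.inl rfl, (mem_mergeDedup r r2 n).2 (Or.inl hn)⟩
      · exact ⟨mergeDedup r1 r, Or.inl rfl, (mem_mergeDedup r1 r n).2 (Or.inr hn)⟩
      · obtain ⟨r', hr', hn'⟩ := ih.2 ⟨r, hr, hn⟩
        exact ⟨r', Or.inr hr', hn'⟩
  | case2 rs h => exact Iff.rfl

theorem pairwise_mergeRound (rs : List (List Int))
    (h : ∀ r ∈ rs, r.Pairwise (· < ·)) : ∀ r ∈ mergeRound rs, r.Pairwise (· < ·) := by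
  fun_induction mergeRound rs with
  | case1 r1 r2 rest ih =>
    intro r hr
    rcases List.mem_cons.1 hr with rfl | hr'
    · exact pairwise_mergeDedup r1 r2 (h r1 (by simp)) (h r2 (by simp))
    · exact ih (fun r hr => h r (by simp [hr])) r hr'
  | case2 rs hne => exact h

theorem mergeAll_inv (rs : List (List Int)) (h : ∀ r ∈ rs, r.Pairwise (· < ·)) :
    (mergeAll rs).Pairwise (· < ·) ∧ ∀ n, n ∈ mergeAll rs ↔ ∃ r ∈ rs, n ∈ r := by
  fun_induction mergeAll rs with
  | case1 => exact ⟨List.Pairwise.nil, by simp⟩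
  | case2 r => exact ⟨h r (by simp), by simp⟩
  | case3 r1 r2 rest ih =>
    have hall : ∀ r ∈ mergeDedup r1 r2 :: mergeRound rest, r.Pairwise (· < ·) := by
      intro r hr
      rcases List.mem_cons.1 hr with rfl | hr'
      · exact pairwise_mergeDedup r1 r2 (h r1 (by simp)) (h r2 (by simp))
      · exact pairwise_mergeRound rest (fun r hr => h r (by simp [hr])) r hr'
    obtain ⟨hpw, hmem⟩ := ih hall
    refine ⟨hpw, fun n => ?_⟩
    rw [hmem n]
    constructor
    · rintro ⟨r, hr, hn⟩
      rcases List.mem_cons.1 hr with rfl | hr'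
      · rcases (mem_mergeDedup r1 r2 n).1 hn with hh | hh
        · exact ⟨r1, by simp, hh⟩
        · exact ⟨r2, by simp, hh⟩
      · obtain ⟨r', hr', hn'⟩ := (mem_mergeRound rest n).1 ⟨r, hr', hn⟩
        exact ⟨r', by simp [hr'], hn'⟩
    · rintro ⟨r, hr, hn⟩
      rcases List.mem_cons.1 hr with rfl | hr'
      · exact ⟨mergeDedup r r2, by simp, (mem_mergeDedup r r2 n).2 (Or.inl hn)⟩
      rcases List.mem_cons.1 hr' with rfl | hr''
      · exact ⟨mergeDedup r1 r, by simp, (mem_mergeDedup r1 r n).2 (Or.inr hn)⟩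
      · obtain ⟨r', hr', hn'⟩ := (mem_mergeRound rest n).2 ⟨r, hr'', hn⟩
        exact ⟨r', by simp [hr'], hn'⟩

theorem find_div2_alt_eq (a b : Int) (P : List Int) :
    find_div2_alt a b P = mergeAll (P.map (fun x => runOf a b |x|)) := by
  unfold find_div2_alt runOf
  simp only [start_eq]

-- ===== VERDICT (by name: the statement is the Claim_ definition above) =====
theorem find_div2_spec : Claim_equal_find_div2 := by
  intro a b P _ hpre
  unfold Spec_find_div2
  have hruns : ∀ r ∈ P.map (fun x => runOf a b |x|), r.Pairwise (· < ·) := by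
    intro r hr
    obtain ⟨x, hx, rfl⟩ := List.mem_map.1 hr
    have hx0 : x ≠ 0 := fun h => hpre (h ▸ hx)
    exact pairwise_runOf a b |x| (abs_pos.mpr hx0)
  obtain ⟨hBpw, hBmem⟩ := mergeAll_inv (P.map (fun x => runOf a b |x|)) hruns
  rw [find_div2_def, find_div2_alt_eq]
  refine PySem.List.sorted_eq_of_perm_of_pairwise_lt _ _ _ ?_ hBpw
  refine (List.perm_ext_iff_of_nodup hBpw.nodup (PySem.Set.nodup_ofList _)).2 (fun n => ?_)
  rw [hBmem n]
  unfold resultA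
  simp only [PySem.Set.mem_ofList, List.mem_map]
  simp only [runOf, neg_mul]
  aesop
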